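-- pv_equiv track=rewrite | github.com/jancaaa/advent-of-code2023 | day09/day09.py | part2
-- ===== SOURCE A (Python) =====
-- def part2(entries: list) -> int:
--     sum = 0
--     for e in entries:
--         x = 0
--         for l in reversed(e):
--             x = l[0] - x
--         sum += x
--     return sum
-- ===== SOURCE B (Python) =====
-- def part2(entries: list) -> int:
--     total = 0
--     for e in entries:
--         firsts = [row[0] for row in e]
--         total += sum(firsts[::2]) - sum(firsts[1::2])
--     return total
-- ===== Notes on version B (the rewrite author's own statement) =====
-- stated objective: alternative
-- what changed: Instead of the reversed running-subtraction accumulator x = row[0] - x, B extracts the list of row heads, splits it into even- and odd-position slices ([::2] and [1::2]) and contributes sum(evens) - sum(odds); no reversal and no accumulator.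
import Mathlib
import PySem

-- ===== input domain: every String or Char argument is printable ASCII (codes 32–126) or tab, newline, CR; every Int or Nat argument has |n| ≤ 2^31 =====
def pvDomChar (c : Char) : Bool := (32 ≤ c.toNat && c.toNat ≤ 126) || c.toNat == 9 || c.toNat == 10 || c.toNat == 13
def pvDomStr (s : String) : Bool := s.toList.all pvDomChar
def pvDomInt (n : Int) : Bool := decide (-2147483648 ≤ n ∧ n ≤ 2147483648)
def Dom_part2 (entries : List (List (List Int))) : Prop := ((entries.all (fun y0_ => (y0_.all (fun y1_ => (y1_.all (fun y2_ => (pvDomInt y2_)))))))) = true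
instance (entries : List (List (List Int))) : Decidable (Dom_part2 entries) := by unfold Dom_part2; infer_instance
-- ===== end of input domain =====

-- B replaces the reversed running-subtraction accumulator by head-extraction plus an even/odd
-- position split, summing the two slices; same cost (objective: alternative).
-- l[0] / row[0] is ported as (pyGet? … 0).getD 0; Pre_part2 excludes empty rows, where Python raises IndexError.

-- ===== PORT A =====
def part2 (entries : List (List (List Int))) : Int :=
  entries.foldl (fun s e => s + e.reverse.foldl (fun x l => (PySem.List.pyGet? l 0).getD 0 - x) 0) 0

-- ===== PORT B =====
-- hand ports of the step-2 slices firsts[::2] and firsts[1::2] (exact: PySem has no step slice)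
mutual
def pvEvens : List Int → List Int
  | [] => []
  | a :: t => a :: pvOdds t
def pvOdds : List Int → List Int
  | [] => []
  | _ :: t => pvEvens t
end

def part2_alt (entries : List (List (List Int))) : Int :=
  entries.foldl (fun total e =>
    let firsts := e.map (fun row => (PySem.List.pyGet? row 0).getD 0)
    total + (pvEvens firsts).sum - (pvOdds firsts).sum) 0

-- ===== PRECONDITION & SPEC =====
-- Pre_ excludes entries containing an empty row, on which both Pythons raise IndexError (l[0] / row[0]).
def Pre_part2 (entries : List (List (List Int))) : Prop :=
  ∀ e ∈ entries, ∀ l ∈ e, l ≠ []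
instance (entries : List (List (List Int))) : Decidable (Pre_part2 entries) := by unfold Pre_part2; infer_instance
def pvWitness_part2 : List (List (List Int)) := [[[1, 2], [3]], [[0]]]
def Spec_part2 (entries : List (List (List Int))) (out : Int) : Prop := out = part2_alt entries
instance (entries : List (List (List Int))) (out : Int) : Decidable (Spec_part2 entries out) := by unfold Spec_part2; infer_instance

-- ===== CLAIM (what is proved, stated in full; the proofs are below) =====
def Claim_equal_part2 : Prop := ∀ (entries : List (List (List Int))), Dom_part2 entries → Pre_part2 entries → Spec_part2 entries (part2 entries)

-- ===== LEMMAS AND PROOFS =====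
-- alternating sum of a list, characterising both inner computations
def pvAlt : List Int → Int
  | [] => 0
  | a :: t => a - pvAlt t

theorem pvA_inner (e : List (List Int)) :
    e.reverse.foldl (fun x l => (PySem.List.pyGet? l 0).getD 0 - x) 0
      = pvAlt (e.map (fun row => (PySem.List.pyGet? row 0).getD 0)) := by
  induction e with
  | nil => rfl
  | cons l t ih => simp [pvAlt, List.foldl_append, ih]

theorem pvB_inner (xs : List Int) : (pvEvens xs).sum - (pvOdds xs).sum = pvAlt xs := by
  induction xs with
  | nil => rfl
  | cons a t ih =>
    have h : (pvEvens t).sum - (pvOdds t).sum = pvAlt t := ih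
    simp only [pvEvens, pvOdds, pvAlt, List.sum_cons]
    omega

theorem pv_fold_eq (entries : List (List (List Int))) (s : Int) :
    entries.foldl (fun s e => s + e.reverse.foldl (fun x l => (PySem.List.pyGet? l 0).getD 0 - x) 0) s
      = entries.foldl (fun total e =>
          let firsts := e.map (fun row => (PySem.List.pyGet? row 0).getD 0)
          total + (pvEvens firsts).sum - (pvOdds firsts).sum) s := by
  induction entries generalizing s with
  | nil => rfl
  | cons e t ih =>
    simp only [List.foldl_cons]
    rw [ih, pvA_inner, ← pvB_inner]
    ring_nf

-- ===== VERDICT (by name: the statement is the Claim_ definition above) =====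
theorem part2_spec : Claim_equal_part2 := by
  intro entries _ _
  unfold Spec_part2 part2 part2_alt
  exact pv_fold_eq entries 0
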